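-- pv_equiv track=rewrite | github.com/currycan/sb-xray | scripts/sb_xray/routing/isp.py | _manual_isp_tag
-- ===== SOURCE A (Python) =====
-- def _manual_isp_tag(default_isp: str) -> str:
--     """Translate e.g. ``"AWS TOKYO_ISP"`` → ``"proxy-aws-tokyo"``."""
--     cleaned = default_isp
--     if cleaned.endswith("_ISP"):
--         cleaned = cleaned[: -len("_ISP")]
--     slug = cleaned.lower()
--     for ch in (" ", "_"):
--         slug = slug.replace(ch, "-")
--     while "--" in slug:
--         slug = slug.replace("--", "-")
--     return f"proxy-{slug.strip('-')}"
-- ===== SOURCE B (Python) =====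
-- def _manual_isp_tag(default_isp: str) -> str:
--     """Translate e.g. ``"AWS TOKYO_ISP"`` -> ``"proxy-aws-tokyo"``."""
--     cleaned = default_isp
--     if cleaned.endswith("_ISP"):
--         cleaned = cleaned[: -len("_ISP")]
--     words = []
--     cur = []
--     for ch in cleaned.lower():
--         if ch in " _-":
--             if cur:
--                 words.append("".join(cur))
--                 cur = []
--         else:
--             cur.append(ch)
--     if cur:
--         words.append("".join(cur))
--     return "proxy-" + "-".join(words)
-- ===== Notes on version B (the rewrite author's own statement) =====
-- stated objective: alternative
-- what changed: Instead of A's repeated replace passes (space and underscore each replaced by a dash, a while loop collapsing double dashes until none remain, then stripping dashes at both ends), B makes one pass over the characters, grouping runs of non-separator characters into words and joining the words with a dash.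
import Mathlib
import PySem

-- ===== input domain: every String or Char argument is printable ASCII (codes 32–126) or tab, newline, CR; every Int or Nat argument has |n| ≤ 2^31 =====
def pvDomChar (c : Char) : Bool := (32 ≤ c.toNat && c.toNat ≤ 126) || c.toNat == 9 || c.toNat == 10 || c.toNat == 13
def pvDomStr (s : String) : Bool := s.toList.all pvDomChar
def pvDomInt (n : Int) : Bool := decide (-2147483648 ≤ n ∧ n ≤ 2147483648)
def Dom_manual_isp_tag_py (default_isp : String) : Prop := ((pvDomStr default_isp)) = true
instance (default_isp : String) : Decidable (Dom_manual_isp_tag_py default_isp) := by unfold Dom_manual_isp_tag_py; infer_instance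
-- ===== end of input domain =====

-- B replaces A's repeated replace passes (two single-char replaces, a '--'-collapsing while loop and a
-- final strip) by one pass over the characters that groups non-separator runs into words and joins them
-- with '-'; objective: alternative (same observable behaviour, different algorithm).

-- ===== PORT A =====
-- pvReplaceDD and the lemmas up to pvReplaceDD_length_lt exist only to justify termination of the
-- while-loop port pvDashLoop below (cited by name in its decreasing_by).
def pvReplaceDD : List Char → List Char
  | [] => []
  | '-' :: '-' :: t => '-' :: pvReplaceDD t
  | c :: t => c :: pvReplaceDD t

theorem pvgo_dd (fuel : Nat) : ∀ (l acc : List Char), l.length ≤ fuel →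
    PySem.Chars.replace.go ['-', '-'] ['-'] fuel l acc = acc.reverse ++ pvReplaceDD l := by
  induction fuel with
  | zero =>
    intro l acc h
    have : l = [] := List.length_eq_zero_iff.mp (Nat.le_zero.mp h)
    subst this
    simp [PySem.Chars.replace.go, pvReplaceDD]
  | succ n ih =>
    intro l acc h
    rcases l with _ | ⟨c, _ | ⟨c2, t2⟩⟩
    · simp [PySem.Chars.replace.go, pvReplaceDD]
    · have hp : (['-', '-'] : List Char).isPrefixOf [c] = false := by
        simp [List.isPrefixOf]
      rw [show PySem.Chars.replace.go ['-','-'] ['-'] (n+1) [c] acc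
            = PySem.Chars.replace.go ['-','-'] ['-'] n [] (c :: acc) from by
          simp [PySem.Chars.replace.go, hp]]
      rw [ih [] _ (by simp)]
      simp [pvReplaceDD]
    · by_cases hc : c = '-' ∧ c2 = '-'
      · obtain ⟨rfl, rfl⟩ := hc
        rw [show PySem.Chars.replace.go ['-','-'] ['-'] (n+1) ('-' :: '-' :: t2) acc
              = PySem.Chars.replace.go ['-','-'] ['-'] n t2 ('-' :: acc) from by
            simp [PySem.Chars.replace.go, List.isPrefixOf]]
        rw [ih t2 _ (by simp at h ⊢; omega)]
        simp [pvReplaceDD]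
      · have hp : (['-', '-'] : List Char).isPrefixOf (c :: c2 :: t2) = false := by
          simp [List.isPrefixOf]
          intro h1 h2; exact hc ⟨h1.symm, h2.symm⟩
        rw [show PySem.Chars.replace.go ['-','-'] ['-'] (n+1) (c :: c2 :: t2) acc
              = PySem.Chars.replace.go ['-','-'] ['-'] n (c2 :: t2) (c :: acc) from by
            simp [PySem.Chars.replace.go, hp]]
        rw [ih _ _ (by simp at h ⊢; omega)]
        have : pvReplaceDD (c :: c2 :: t2) = c :: pvReplaceDD (c2 :: t2) := by
          rw [pvReplaceDD.eq_def]
          split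
          · rename_i heq; cases heq
          · rename_i t heq
            injection heq with e1 rest
            injection rest with e2 _
            exact absurd ⟨e1, e2⟩ hc
          · rename_i c' t' hne heq
            injection heq with e1 e2
            subst e1; subst e2; rfl
        rw [this]
        simp

theorem pvReplaceDD_cons (c : Char) (t : List Char) (h : ∀ t', ¬(c = '-' ∧ t = '-' :: t')) :
    pvReplaceDD (c :: t) = c :: pvReplaceDD t := by
  rw [pvReplaceDD.eq_def]
  split
  · rename_i heq; cases heq
  · rename_i t' heq
    injection heq with e1 rest
    exact absurd ⟨e1, rest⟩ (h t')
  · rename_i c' t' hne heq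
    injection heq with e1 e2
    subst e1; subst e2; rfl

theorem pvReplaceDD_length_le (s : List Char) : (pvReplaceDD s).length ≤ s.length := by
  induction s using pvReplaceDD.induct with
  | case1 => simp [pvReplaceDD]
  | case2 t ih => simp [pvReplaceDD]; omega
  | case3 c t hne ih =>
    rw [pvReplaceDD_cons c t (by intro t' ⟨h1, h2⟩; exact hne t' h1 h2)]
    simp; omega

theorem pvReplaceDD_length_lt (s : List Char) (h : ['-', '-'] <:+: s) :
    (pvReplaceDD s).length < s.length := by
  induction s using pvReplaceDD.induct with
  | case1 => simp at h
  | case2 t ih =>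
    have := pvReplaceDD_length_le t
    simp [pvReplaceDD]; omega
  | case3 c t hne ih =>
    rw [pvReplaceDD_cons c t (by intro t' ⟨h1, h2⟩; exact hne t' h1 h2)]
    have ht : ['-', '-'] <:+: t := by
      obtain ⟨pre, post, heq⟩ := h
      rcases pre with _ | ⟨x, pre'⟩
      · simp at heq
        exact absurd heq.2.symm (by intro h2; exact hne post heq.1.symm h2)
      · simp at heq
        exact ⟨pre', post, by rw [← heq.2]; simp⟩
    have := ih ht
    simp; omega


theorem pvreplace_dd (s : List Char) :
    PySem.Chars.replace s ['-', '-'] ['-'] = pvReplaceDD s := by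
  simp [PySem.Chars.replace]
  exact pvgo_dd s.length s [] le_rfl


-- the 'while "--" in slug: slug = slug.replace("--", "-")' loop of A
def pvDashLoop (s : String) : String :=
  if h : PySem.Str.isIn "--" s = true then
    pvDashLoop (PySem.Str.replace s "--" "-")
  else s
termination_by s.toList.length
decreasing_by
  rw [PySem.Str.toList_replace]
  have hin : ("--" : String).toList <:+: s.toList := (PySem.Str.isIn_iff_infix _ _).mp h
  rw [show ("--" : String).toList = ['-', '-'] from rfl] at hin
  rw [show ("--" : String).toList = ['-', '-'] from rfl,
      show ("-" : String).toList = ['-'] from rfl, pvreplace_dd]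
  exact pvReplaceDD_length_lt _ hin

def manual_isp_tag_py (default_isp : String) : String :=
  let cleaned := default_isp
  let cleaned := if PySem.Str.endswith cleaned "_ISP"
    then PySem.Str.slice cleaned none (some (-(PySem.Str.len "_ISP"))) else cleaned
  let slug := PySem.Str.lower cleaned
  let slug := [" ", "_"].foldl (fun sl ch => PySem.Str.replace sl ch "-") slug
  let slug := pvDashLoop slug
  "proxy-" ++ PySem.Str.stripChars slug "-"

-- ===== PORT B =====
-- loop body of B: 'if ch in " _-": flush cur into words; else: cur.append(ch)'
def pvStep (st : List (List Char) × List Char) (ch : Char) : List (List Char) × List Char :=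
  if [' ', '_', '-'].contains ch then
    (if st.2 ≠ [] then (st.1 ++ [st.2], []) else (st.1, []))
  else (st.1, st.2 ++ [ch])

def manual_isp_tag_py_alt (default_isp : String) : String :=
  let cleaned := default_isp
  let cleaned := if PySem.Str.endswith cleaned "_ISP"
    then PySem.Str.slice cleaned none (some (-(PySem.Str.len "_ISP"))) else cleaned
  let st := (PySem.Str.lower cleaned).toList.foldl pvStep ([], [])
  let words := if st.2 ≠ [] then st.1 ++ [st.2] else st.1
  "proxy-" ++ String.ofList (PySem.Chars.join ['-'] words)

-- ===== PRECONDITION & SPEC =====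
def Spec_manual_isp_tag_py (default_isp : String) (out : String) : Prop := out = manual_isp_tag_py_alt default_isp
instance (default_isp : String) (out : String) : Decidable (Spec_manual_isp_tag_py default_isp out) := by unfold Spec_manual_isp_tag_py; infer_instance

-- ===== CLAIM (what is proved, stated in full; the proofs are below) =====
def Claim_equal_manual_isp_tag_py : Prop := ∀ (default_isp : String), Dom_manual_isp_tag_py default_isp → Spec_manual_isp_tag_py default_isp (manual_isp_tag_py default_isp)

-- ===== LEMMAS AND PROOFS =====

def pvCollapse : List Char → List Char
  | [] => []
  | '-' :: '-' :: t => pvCollapse ('-' :: t)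
  | c :: t => c :: pvCollapse t

theorem pvCollapse_cons (c : Char) (t : List Char) (h : ∀ t', ¬(c = '-' ∧ t = '-' :: t')) :
    pvCollapse (c :: t) = c :: pvCollapse t := by
  rw [pvCollapse.eq_def]
  split
  · rename_i heq; cases heq
  · rename_i t' heq
    injection heq with e1 rest
    exact absurd ⟨e1, rest⟩ (h t')
  · rename_i c' t' hne heq
    injection heq with e1 e2
    subst e1; subst e2; rfl


def pvPd : Char → Bool := fun c => decide (c = '-')
def pvSepB : Char → Bool := fun c => ([' ', '_', '-'] : List Char).contains c

def pvW (m : List Char) : List (List Char) :=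
  (List.splitOnP pvPd m).filter (fun w => !w.isEmpty)

theorem pvStripChars_eq (s : List Char) :
    PySem.Chars.stripChars s ['-'] = (List.dropWhile pvPd (List.dropWhile pvPd s).reverse).reverse := by
  simp [PySem.Chars.stripChars]
  exact rfl

def pvRstrip (x : List Char) : List Char := (List.dropWhile pvPd x.reverse).reverse

theorem pvRstrip_append (s x : List Char) (h : pvRstrip x ≠ []) :
    pvRstrip (s ++ x) = s ++ pvRstrip x := by
  unfold pvRstrip at *
  rw [List.reverse_append, List.dropWhile_append]
  have he : (List.dropWhile pvPd x.reverse).isEmpty = false := by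
    rcases hh : List.dropWhile pvPd x.reverse with _ | ⟨a, b⟩
    · rw [hh] at h; simp at h
    · simp
  rw [he]
  simp

-- collapse commutes with left dash-stripping
theorem pvCollapse_dropWhile (m : List Char) :
    List.dropWhile pvPd (pvCollapse m) = pvCollapse (List.dropWhile pvPd m) := by
  induction m using pvCollapse.induct with
  | case1 => rfl
  | case2 t ih =>
    rw [show pvCollapse ('-' :: '-' :: t) = pvCollapse ('-' :: t) from by simp [pvCollapse]]
    rw [ih]
    rw [show List.dropWhile pvPd ('-' :: '-' :: t) = List.dropWhile pvPd ('-' :: t) from by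
      simp [List.dropWhile_cons, pvPd]]
  | case3 c t hne ih =>
    have hcons : pvCollapse (c :: t) = c :: pvCollapse t :=
      pvCollapse_cons c t (by intro t' ⟨h1, h2⟩; exact hne t' h1 h2)
    rw [hcons]
    by_cases hc : c = '-'
    · subst hc
      have ht : List.dropWhile pvPd t = t := by
        rcases t with _ | ⟨x, t2⟩
        · rfl
        · have hx : x ≠ '-' := by intro hx; exact hne t2 rfl (by rw [hx])
          simp [List.dropWhile_cons, pvPd, hx]
      rw [show List.dropWhile pvPd ('-' :: pvCollapse t) = List.dropWhile pvPd (pvCollapse t) from by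
        simp [List.dropWhile_cons, pvPd]]
      rw [show List.dropWhile pvPd ('-' :: t) = List.dropWhile pvPd t from by
        simp [List.dropWhile_cons, pvPd]]
      rw [ih, ht]
    · rw [show List.dropWhile pvPd (c :: pvCollapse t) = c :: pvCollapse t from by
        simp [List.dropWhile_cons, pvPd, hc]]
      rw [show List.dropWhile pvPd (c :: t) = c :: t from by
        simp [List.dropWhile_cons, pvPd, hc]]
      rw [hcons]

-- collapsing a dash run
theorem pvCollapse_dash (t : List Char) :
    pvCollapse ('-' :: t) = '-' :: pvCollapse (List.dropWhile pvPd t) := by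
  induction t with
  | nil => rfl
  | cons x t2 ih =>
    by_cases hx : x = '-'
    · subst hx
      rw [show pvCollapse ('-' :: '-' :: t2) = pvCollapse ('-' :: t2) from by simp [pvCollapse]]
      rw [ih]
      rw [show List.dropWhile pvPd ('-' :: t2) = List.dropWhile pvPd t2 from by
        simp [List.dropWhile_cons, pvPd]]
    · rw [pvCollapse_cons '-' (x :: t2) (by intro t' ⟨_, h2⟩; injection h2 with e _; exact hx e)]
      rw [show List.dropWhile pvPd (x :: t2) = x :: t2 from by simp [List.dropWhile_cons, pvPd, hx]]

-- dropping leading dashes does not change the word list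
theorem pvW_dropWhile (m : List Char) : pvW (List.dropWhile pvPd m) = pvW m := by
  induction m with
  | nil => rfl
  | cons x t ih =>
    by_cases hx : x = '-'
    · subst hx
      rw [show List.dropWhile pvPd ('-' :: t) = List.dropWhile pvPd t from by
        simp [List.dropWhile_cons, pvPd]]
      rw [ih]
      unfold pvW
      rw [List.splitOnP_cons]
      rw [show pvPd '-' = true from rfl]
      simp
    · rw [show List.dropWhile pvPd (x :: t) = x :: t from by simp [List.dropWhile_cons, pvPd, hx]]

-- splitOnP on a non-separator head
theorem pvSplit_cons (c : Char) (t : List Char) (hc : c ≠ '-') :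
    ∃ g rest, List.splitOnP pvPd (c :: t) = (c :: g) :: rest := by
  rcases h : List.splitOnP pvPd t with _ | ⟨g0, rest0⟩
  · exact absurd h (List.splitOnP_ne_nil _ _)
  · refine ⟨g0, rest0, ?_⟩
    rw [List.splitOnP_cons, show pvPd c = false from by simp [pvPd, hc], h]
    simp

theorem pvJoin_head (c : Char) (w : List Char) (ws : List (List Char)) :
    PySem.Chars.join ['-'] ((c :: w) :: ws) = c :: PySem.Chars.join ['-'] (w :: ws) := by
  rcases ws with _ | ⟨w2, ws2⟩
  · rw [PySem.Chars.join_singleton, PySem.Chars.join_singleton]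
  · rw [PySem.Chars.join_cons_cons, PySem.Chars.join_cons_cons]
    simp

theorem pvJoin_head_ne (c : Char) (w : List Char) (ws : List (List Char)) :
    PySem.Chars.join ['-'] ((c :: w) :: ws) ≠ [] := by
  rw [pvJoin_head]; simp

theorem pvMain : (m : List Char) → (∀ x, m.head? = some x → x ≠ '-') →
    pvRstrip (pvCollapse m) = PySem.Chars.join ['-'] (pvW m)
  | [], _ => by
    simp [pvRstrip, pvCollapse, pvW, PySem.Chars.join, List.intercalate]
  | [c], hm => by
    have hc : c ≠ '-' := hm c rfl
    have h1 : pvCollapse [c] = [c] := pvCollapse_cons c [] (by intro t' ⟨_, h2⟩; cases h2)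
    rw [h1, show pvRstrip [c] = [c] from by simp [pvRstrip, pvPd, hc]]
    unfold pvW
    rw [List.splitOnP_cons, show pvPd c = false from by simp [pvPd, hc]]
    simp [PySem.Chars.join_singleton]
  | c :: c2 :: t2, hm => by
    have hc : c ≠ '-' := hm c rfl
    by_cases h2 : c2 = '-'
    · subst h2
      have hcol : pvCollapse (c :: '-' :: t2) = c :: '-' :: pvCollapse (List.dropWhile pvPd t2) := by
        rw [pvCollapse_cons c ('-' :: t2) (by intro t' ⟨h1, _⟩; exact hc h1), pvCollapse_dash]
      have hWc : pvW (c :: '-' :: t2) = [c] :: pvW t2 := by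
        unfold pvW
        rw [List.splitOnP_cons, show pvPd c = false from by simp [pvPd, hc],
            List.splitOnP_cons, show pvPd '-' = true from rfl]
        simp
      have hWt2 : pvW t2 = pvW (List.dropWhile pvPd t2) := (pvW_dropWhile t2).symm
      rcases hu2 : List.dropWhile pvPd t2 with _ | ⟨u1, u2⟩
      · rw [hcol, hu2, show pvCollapse ([] : List Char) = [] from rfl]
        rw [show pvRstrip [c, '-'] = [c] from by simp [pvRstrip, pvPd, hc]]
        rw [hWc, hWt2, hu2]
        rw [show pvW ([] : List Char) = [] from by simp [pvW]]
        rw [PySem.Chars.join_singleton]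
      · have hu1 : u1 ≠ '-' := by
          have hh := List.head?_dropWhile_not pvPd t2
          rw [hu2] at hh
          simp at hh
          simpa [pvPd] using hh
        have ihu : pvRstrip (pvCollapse (List.dropWhile pvPd t2)) =
            PySem.Chars.join ['-'] (pvW (List.dropWhile pvPd t2)) :=
          pvMain (List.dropWhile pvPd t2) (by
            intro x hx
            rw [hu2] at hx
            simp at hx
            exact hx ▸ hu1)
        obtain ⟨g, rest, hsplit⟩ := pvSplit_cons u1 u2 hu1
        have hWu : pvW (List.dropWhile pvPd t2) =
            (u1 :: g) :: rest.filter (fun w => !w.isEmpty) := by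
          unfold pvW
          rw [hu2, hsplit]
          simp
        have hne : pvRstrip (pvCollapse (List.dropWhile pvPd t2)) ≠ [] := by
          rw [ihu, hWu]; exact pvJoin_head_ne _ _ _
        rw [hcol, show c :: '-' :: pvCollapse (List.dropWhile pvPd t2)
              = [c, '-'] ++ pvCollapse (List.dropWhile pvPd t2) from rfl,
            pvRstrip_append _ _ hne, ihu]
        rw [hWc, hWt2, hWu]
        rw [PySem.Chars.join_cons_cons]
        simp
    · have iht : pvRstrip (pvCollapse (c2 :: t2)) = PySem.Chars.join ['-'] (pvW (c2 :: t2)) :=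
        pvMain (c2 :: t2) (by intro x hx; simp at hx; exact hx ▸ h2)
      have hcol : pvCollapse (c :: c2 :: t2) = c :: pvCollapse (c2 :: t2) :=
        pvCollapse_cons _ _ (by intro t' ⟨h1, _⟩; exact hc h1)
      obtain ⟨g, rest, hsplit⟩ := pvSplit_cons c2 t2 h2
      have hW2 : pvW (c2 :: t2) = (c2 :: g) :: rest.filter (fun w => !w.isEmpty) := by
        unfold pvW; rw [hsplit]; simp
      have hWc : pvW (c :: c2 :: t2) = (c :: c2 :: g) :: rest.filter (fun w => !w.isEmpty) := by
        unfold pvW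
        rw [List.splitOnP_cons, show pvPd c = false from by simp [pvPd, hc], hsplit]
        simp
      have hne : pvRstrip (pvCollapse (c2 :: t2)) ≠ [] := by
        rw [iht, hW2]; exact pvJoin_head_ne _ _ _
      rw [hcol, show c :: pvCollapse (c2 :: t2) = [c] ++ pvCollapse (c2 :: t2) from rfl,
          pvRstrip_append _ _ hne, iht, hWc, hW2, pvJoin_head, pvJoin_head]
      simp [pvJoin_head]
termination_by m _ => m.length
decreasing_by
  all_goals have := List.length_dropWhile_le pvPd t2
  all_goals simp
  all_goals omega

theorem pvAside (m : List Char) :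
    PySem.Chars.stripChars (pvCollapse m) ['-'] = PySem.Chars.join ['-'] (pvW m) := by
  rw [pvStripChars_eq]
  show pvRstrip (List.dropWhile pvPd (pvCollapse m)) = _
  rw [pvCollapse_dropWhile]
  rw [pvMain (List.dropWhile pvPd m) (by
    intro x hx
    have hh := List.head?_dropWhile_not pvPd m
    rw [hx] at hh
    simpa [pvPd] using hh)]
  rw [pvW_dropWhile]

theorem pvFold (l : List Char) : ∀ ws cur,
    (if (l.foldl pvStep (ws, cur)).2 ≠ [] then
       (l.foldl pvStep (ws, cur)).1 ++ [(l.foldl pvStep (ws, cur)).2]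
     else (l.foldl pvStep (ws, cur)).1)
    = ws ++ (List.modifyHead (cur ++ ·) (List.splitOnP pvSepB l)).filter (fun w => !w.isEmpty) := by
  induction l with
  | nil =>
    intro ws cur
    simp only [List.foldl_nil, List.splitOnP_nil, List.modifyHead_cons]
    by_cases hc : cur = []
    · subst hc; simp
    · have hce : cur.isEmpty = false := by simpa using hc
      simp [List.filter_cons, hce, hc]
  | cons c t ih =>
    intro ws cur
    by_cases hs : ([' ', '_', '-'] : List Char).contains c
    · have hs' : c = ' ' ∨ c = '_' ∨ c = '-' := by simpa using hs
      have hstep : pvStep (ws, cur) c = ((if cur = [] then ws else ws ++ [cur]), []) := by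
        simp [pvStep, hs']
        split <;> rfl
      rw [List.foldl_cons, hstep, ih]
      rw [List.splitOnP_cons, show pvSepB c = true from hs]
      have hmid : List.modifyHead (fun x => ([] : List Char) ++ x) (List.splitOnP pvSepB t)
          = List.splitOnP pvSepB t := by
        exact congrFun List.modifyHead_id _
      rw [hmid]
      simp only [List.modifyHead_cons]
      by_cases hc : cur = []
      · subst hc; simp
      · have hce : cur.isEmpty = false := by simpa using hc
        simp [List.filter_cons, hce, hc]
    · have hs' : ¬(c = ' ' ∨ c = '_' ∨ c = '-') := by simpa using hs
      have hstep : pvStep (ws, cur) c = (ws, cur ++ [c]) := by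
        simp [pvStep, hs']
      rw [List.foldl_cons, hstep, ih]
      rw [List.splitOnP_cons, show pvSepB c = false from by simpa [pvSepB] using hs]
      simp only [Bool.false_eq_true, if_false]
      rw [List.modifyHead_modifyHead]
      have hfun : ((fun x => cur ++ x) ∘ List.cons c) = fun x => cur ++ [c] ++ x := by
        funext x; simp
      rw [hfun]

theorem pvgo_one (a b : Char) (fuel : Nat) : ∀ (l acc : List Char), l.length ≤ fuel →
    PySem.Chars.replace.go [a] [b] fuel l acc
      = acc.reverse ++ l.map (fun c => if c = a then b else c) := by
  induction fuel with
  | zero =>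
    intro l acc h
    have : l = [] := List.length_eq_zero_iff.mp (Nat.le_zero.mp h)
    subst this
    simp [PySem.Chars.replace.go]
  | succ n ih =>
    intro l acc h
    rcases l with _ | ⟨c, t⟩
    · simp [PySem.Chars.replace.go]
    · by_cases hc : c = a
      · subst hc
        rw [show PySem.Chars.replace.go [c] [b] (n+1) (c :: t) acc
              = PySem.Chars.replace.go [c] [b] n t ([b].reverse ++ acc) from by
            simp [PySem.Chars.replace.go, List.isPrefixOf]]
        rw [ih t _ (by simp at h ⊢; omega)]
        simp
      · have hp : ([a] : List Char).isPrefixOf (c :: t) = false := by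
          simp [List.isPrefixOf]
          exact fun e => hc e.symm
        rw [show PySem.Chars.replace.go [a] [b] (n+1) (c :: t) acc
              = PySem.Chars.replace.go [a] [b] n t (c :: acc) from by
            simp [PySem.Chars.replace.go, hp]]
        rw [ih t _ (by simp at h ⊢; omega)]
        simp [hc]

theorem pvReplace_one (s : List Char) (a b : Char) :
    PySem.Chars.replace s [a] [b] = s.map (fun c => if c = a then b else c) := by
  simp [PySem.Chars.replace]
  exact pvgo_one a b s.length s [] le_rfl

def pvG (c : Char) : Char :=
  if (if c = ' ' then '-' else c) = '_' then '-' else (if c = ' ' then '-' else c)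

theorem pvSplit_map (l : List Char) :
    List.splitOnP pvPd (l.map pvG) = List.splitOnP pvSepB l := by
  induction l with
  | nil => rfl
  | cons c t ih =>
    rw [List.map_cons, List.splitOnP_cons, List.splitOnP_cons, ih]
    by_cases hs : c = ' ' ∨ c = '_' ∨ c = '-'
    · rw [show pvPd (pvG c) = true from by
        rcases hs with h | h | h <;> subst h <;> rfl]
      rw [show pvSepB c = true from by
        rcases hs with h | h | h <;> subst h <;> rfl]
      simp
    · push_neg at hs
      obtain ⟨h1, h2, h3⟩ := hs
      rw [show pvG c = c from by simp [pvG, h1, h2]]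
      rw [show pvPd c = false from by simp [pvPd, h3]]
      rw [show pvSepB c = false from by simp [pvSepB, List.contains_eq_mem, h1, h2, h3]]

theorem pvCollapse_of_noDD (m : List Char) (h : ¬ ['-', '-'] <:+: m) : pvCollapse m = m := by
  induction m using pvCollapse.induct with
  | case1 => rfl
  | case2 t ih =>
    exact absurd ⟨[], t, rfl⟩ h
  | case3 c t hne ih =>
    rw [pvCollapse_cons c t (by intro t' ⟨h1, h2⟩; exact hne t' h1 h2)]
    rw [ih (by intro hin; exact h (List.infix_cons hin))]

theorem pvCollapse_replaceDD (m : List Char) :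
    pvCollapse (pvReplaceDD m) = pvCollapse m ∧
    pvCollapse ('-' :: pvReplaceDD m) = pvCollapse ('-' :: m) := by
  induction m using pvReplaceDD.induct with
  | case1 => simp [pvReplaceDD]
  | case2 t ih =>
    have e : pvReplaceDD ('-' :: '-' :: t) = '-' :: pvReplaceDD t := by simp [pvReplaceDD]
    rw [e]
    constructor
    · rw [show pvCollapse ('-' :: '-' :: t) = pvCollapse ('-' :: t) from by simp [pvCollapse]]
      exact ih.2
    · rw [show pvCollapse ('-' :: '-' :: pvReplaceDD t) = pvCollapse ('-' :: pvReplaceDD t) from by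
        simp [pvCollapse]]
      rw [show pvCollapse ('-' :: '-' :: '-' :: t) = pvCollapse ('-' :: '-' :: t) from by
        simp [pvCollapse]]
      rw [show pvCollapse ('-' :: '-' :: t) = pvCollapse ('-' :: t) from by simp [pvCollapse]]
      exact ih.2
  | case3 c t hne ih =>
    have e : pvReplaceDD (c :: t) = c :: pvReplaceDD t :=
      pvReplaceDD_cons c t (by intro t' ⟨h1, h2⟩; exact hne t' h1 h2)
    rw [e]
    by_cases hc : c = '-'
    · subst hc
      constructor
      · exact ih.2
      · rw [show pvCollapse ('-' :: '-' :: pvReplaceDD t) = pvCollapse ('-' :: pvReplaceDD t) from by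
          simp [pvCollapse]]
        rw [show pvCollapse ('-' :: '-' :: t) = pvCollapse ('-' :: t) from by simp [pvCollapse]]
        exact ih.2
    · have hcons : ∀ (x : List Char) , pvCollapse (c :: x) = c :: pvCollapse x := fun x =>
        pvCollapse_cons c x (by intro t' ⟨h1, _⟩; exact hc h1)
      constructor
      · rw [hcons, hcons, ih.1]
      · have hdash : ∀ (x : List Char), pvCollapse ('-' :: c :: x) = '-' :: pvCollapse (c :: x) := by
          intro x
          exact pvCollapse_cons '-' (c :: x) (by intro t' ⟨_, h2⟩; injection h2 with e2 _; exact hc e2)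
        rw [hdash, hdash, hcons, hcons, ih.1]

theorem pvDashLoop_toList (s : String) : (pvDashLoop s).toList = pvCollapse s.toList := by
  induction s using pvDashLoop.induct with
  | case1 s h ih =>
    rw [pvDashLoop, dif_pos h, ih, PySem.Str.toList_replace,
        show ("--" : String).toList = ['-', '-'] from rfl,
        show ("-" : String).toList = ['-'] from rfl, pvreplace_dd]
    exact (pvCollapse_replaceDD _).1
  | case2 s h =>
    rw [pvDashLoop, dif_neg h]
    refine (pvCollapse_of_noDD _ ?_).symm
    intro hin
    exact h ((PySem.Str.isIn_iff_infix ("--" : String) s).mpr hin)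

theorem pvCore (cl : String) :
    "proxy-" ++ PySem.Str.stripChars
        (pvDashLoop ([" ", "_"].foldl (fun sl ch => PySem.Str.replace sl ch "-") (PySem.Str.lower cl))) "-"
    = "proxy-" ++ String.ofList (PySem.Chars.join ['-']
        (if ((PySem.Str.lower cl).toList.foldl pvStep ([], [])).2 ≠ [] then
          ((PySem.Str.lower cl).toList.foldl pvStep ([], [])).1
            ++ [((PySem.Str.lower cl).toList.foldl pvStep ([], [])).2]
        else ((PySem.Str.lower cl).toList.foldl pvStep ([], [])).1)) := by
  apply String.toList_inj.mp
  rw [String.toList_append, String.toList_append, String.toList_ofList]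
  refine congrArg (fun x => ("proxy-" : String).toList ++ x) ?_
  rw [List.foldl_cons, List.foldl_cons, List.foldl_nil]
  try rw [String.toList_ofList]
  rw [PySem.Str.toList_stripChars, show ("-" : String).toList = ['-'] from rfl]
  rw [pvDashLoop_toList]
  rw [PySem.Str.toList_replace, PySem.Str.toList_replace]
  rw [show ("_" : String).toList = ['_'] from rfl,
      show (" " : String).toList = [' '] from rfl,
      show ("-" : String).toList = ['-'] from rfl]
  rw [pvReplace_one, pvReplace_one, List.map_map]
  rw [show ((fun c => if c = '_' then '-' else c) ∘ (fun c => if c = ' ' then '-' else c)) = pvG from rfl]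
  rw [pvAside]
  unfold pvW
  rw [pvSplit_map]
  rw [pvFold]
  rw [show List.modifyHead (fun x => ([] : List Char) ++ x) (List.splitOnP pvSepB (PySem.Str.lower cl).toList)
        = List.splitOnP pvSepB (PySem.Str.lower cl).toList from congrFun List.modifyHead_id _]
  simp

-- ===== VERDICT (by name: the statement is the Claim_ definition above) =====
theorem manual_isp_tag_py_spec : Claim_equal_manual_isp_tag_py := by
  intro default_isp _hdom
  unfold Spec_manual_isp_tag_py manual_isp_tag_py manual_isp_tag_py_alt
  exact pvCore _
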